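-- pv_equiv track=rewrite | github.com/milesmackenzie/python_scripts | alphabet_order.py | alphabetic
-- ===== SOURCE A (Python) =====
-- import string
--
-- def alphabetic(s):
--     i = 0
--     dic = dict(zip(string.ascii_lowercase, range(1,27)))
--     s = list(s)
--     print (s)
--     ss = []
--     b = []
--     for let in s:
--         ss.append(dic[let])
--     for num in range(0, len(ss) - 1 ):
--         if ss[num] <= ss[num+1]:
--             pass
--         else:
--             return False
--     return True
-- ===== SOURCE B (Python) =====
-- import string
--
-- def alphabetic(s):
--     dic = dict(zip(string.ascii_lowercase, range(1, 27)))
--     s = list(s)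
--     print(s)
--     nums = [dic[let] for let in s]
--     return nums == sorted(nums)
-- ===== Notes on version B (the rewrite author's own statement) =====
-- stated objective: idiomatic
-- what changed: Replaces the indexed adjacent-pair scan over range(len-1) with the idiomatic sort-and-compare sortedness test (nums == sorted(nums)), keeping the dict mapping and the print.
import Mathlib
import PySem

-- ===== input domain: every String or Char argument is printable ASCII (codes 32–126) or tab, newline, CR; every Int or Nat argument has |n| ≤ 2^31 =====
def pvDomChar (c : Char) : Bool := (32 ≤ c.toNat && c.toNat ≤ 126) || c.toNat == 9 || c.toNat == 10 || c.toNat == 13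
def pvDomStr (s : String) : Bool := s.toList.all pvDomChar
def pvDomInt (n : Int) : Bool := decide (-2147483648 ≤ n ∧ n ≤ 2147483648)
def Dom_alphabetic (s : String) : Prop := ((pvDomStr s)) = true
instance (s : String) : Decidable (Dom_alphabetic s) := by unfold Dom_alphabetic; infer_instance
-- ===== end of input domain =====

-- B replaces the indexed adjacent-pair scan with the idiomatic 'nums == sorted(nums)'
-- sortedness test (same dict mapping, same print side effect); equivalence is about the
-- return value only (both print list(s) identically).

-- ===== PORT A =====
-- dic = dict(zip(string.ascii_lowercase, range(1, 27)))  (shared by both ports; both Pythons build it the same way)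
def pvDic : PySem.Dict Char Int :=
  PySem.Dict.ofList ("abcdefghijklmnopqrstuvwxyz".toList.zip (PySem.List.pyRange 1 27 1))

-- the 'for num in range(0, len(ss)-1)' loop with its early 'return False';
-- ss[num] is always in range here, so pyGetD with default 0 is exact under Pre_
def pvLoopA (ss : List Int) : List Int → Bool
  | [] => true
  | num :: rest =>
    if PySem.List.pyGetD ss num 0 ≤ PySem.List.pyGetD ss (num + 1) 0 then pvLoopA ss rest
    else false

def alphabetic (s : String) : Bool :=
  -- dic[let] raises KeyError for a non-lowercase char: Pre_ excludes those, getD is exact inside Pre_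
  let ss := s.toList.map (fun let_ => pvDic.getD let_ 0)
  pvLoopA ss (PySem.List.pyRange 0 ((ss.length : Int) - 1) 1)

-- ===== PORT B =====
def alphabetic_alt (s : String) : Bool :=
  let nums := s.toList.map (fun let_ => pvDic.getD let_ 0)
  nums == PySem.List.sorted nums (fun x => x) false

-- ===== PRECONDITION & SPEC =====
-- A (and B) raise KeyError on any character outside 'a'..'z'; Pre_ excludes exactly those inputs.
def Pre_alphabetic (s : String) : Prop :=
  s.toList.all (fun c => 'a' ≤ c && c ≤ 'z') = true
instance (s : String) : Decidable (Pre_alphabetic s) := by unfold Pre_alphabetic; infer_instance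

def pvWitness_alphabetic : String := "abcd"

def Spec_alphabetic (s : String) (out : Bool) : Prop := out = alphabetic_alt s
instance (s : String) (out : Bool) : Decidable (Spec_alphabetic s out) := by unfold Spec_alphabetic; infer_instance

-- ===== CLAIM (what is proved, stated in full; the proofs are below) =====
def Claim_equal_alphabetic : Prop := ∀ (s : String), Dom_alphabetic s → Pre_alphabetic s → Spec_alphabetic s (alphabetic s)

-- ===== LEMMAS AND PROOFS =====

-- A's loop is an 'all' over the visited indices
theorem pvLoopA_eq_all (ss l : List Int) :
    pvLoopA ss l
      = l.all (fun num => decide (PySem.List.pyGetD ss num 0 ≤ PySem.List.pyGetD ss (num + 1) 0)) := by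
  induction l with
  | nil => rfl
  | cons x xs ih =>
    by_cases h : PySem.List.pyGetD ss x 0 ≤ PySem.List.pyGetD ss (x + 1) 0 <;>
      simp [pvLoopA, ih, h]

-- adjacent-pair ordering over the index range ↔ the list is pairwise ≤
theorem pvAdjacent_iff_pairwise (ns : List Int) :
    (∀ num ∈ PySem.List.pyRange 0 ((ns.length : Int) - 1) 1,
        PySem.List.pyGetD ns num 0 ≤ PySem.List.pyGetD ns (num + 1) 0)
      ↔ ns.Pairwise (· ≤ ·) := by
  rw [← List.isChain_iff_pairwise, List.isChain_iff_getElem]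
  constructor
  · intro h i hi
    have hmem : (i : Int) ∈ PySem.List.pyRange 0 ((ns.length : Int) - 1) 1 := by
      rw [PySem.List.mem_pyRange_one]; omega
    have := h (i : Int) hmem
    rw [PySem.List.pyGetD_eq_getElem ns 0 (by omega) (by omega),
        PySem.List.pyGetD_eq_getElem ns 0 (by omega) (by omega)] at this
    have ht : ((i : Int) + 1).toNat = i + 1 := by omega
    have ht0 : ((i : Int)).toNat = i := by omega
    simp only [ht, ht0] at this
    exact this
  · intro h num hnum
    rw [PySem.List.mem_pyRange_one] at hnum
    rw [PySem.List.pyGetD_eq_getElem ns 0 (by omega) (by omega),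
        PySem.List.pyGetD_eq_getElem ns 0 (by omega) (by omega)]
    have ht : (num + 1).toNat = num.toNat + 1 := by omega
    simp only [ht]
    exact h num.toNat (by omega)

-- the core fact: A's scan equals B's sort-and-compare, for ANY list of Ints
theorem pvScan_eq_sorted (ns : List Int) :
    pvLoopA ns (PySem.List.pyRange 0 ((ns.length : Int) - 1) 1)
      = (ns == PySem.List.sorted ns (fun x => x) false) := by
  rw [pvLoopA_eq_all, Bool.eq_iff_iff, List.all_eq_true, beq_iff_eq]
  simp only [decide_eq_true_eq]
  rw [pvAdjacent_iff_pairwise]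
  constructor
  · intro h; exact (PySem.List.sorted_eq_self_of_pairwise ns (fun x => x) h).symm
  · intro h; rw [h]; exact PySem.List.sorted_pairwise ns (fun x => x)

-- ===== VERDICT (by name: the statement is the Claim_ definition above) =====
theorem alphabetic_spec : Claim_equal_alphabetic := by
  intro s _ _
  unfold Spec_alphabetic alphabetic alphabetic_alt
  exact pvScan_eq_sorted _
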